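/-
  The named simp sets of the field vocabulary (a simp attribute must be declared in a module imported by the ones that use
  it). All four sets are empty here; Vorbis/Fields.lean says what each is for.

      @[voff]     the offset constants `Off.stb_vorbis.channels = 4` …                     (Vorbis/Fields/Offsets.lean, generated)
      @[vacc]     the accessors unfolded to a typed read: `stb_vorbis.channels mem f = mem.i32 (f + Off.stb_vorbis.channels)`
      @[vfield]   a load as the stepper leaves it, rewritten to a typed read at a `Nat` address   (Vorbis/Fields/Core.lean)
      @[vblock]   the notions of `Block` unfolded to inequalities between numbers, for `omega`    (Vorbis/Fields/Core.lean)
-/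
import Lean

/-- The struct offset, size and count constants as numerals (`simp only [voff]`). -/
register_simp_attr voff

/-- The field accessors unfolded to typed reads (`simp only [vacc, voff]`). -/
register_simp_attr vacc

/-- Stepper-shaped loads and word address arithmetic rewritten to typed reads at number addresses (`simp only [vfield]`). -/
register_simp_attr vfield

/-- `Block.contains`, `disjoint`, `sub`, `live`, `Same` … unfolded to arithmetic and the model's notions (`simp only [vblock]`). -/
register_simp_attr vblock
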